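-- pv_equiv track=rewrite | github.com/chandi-mptk/Day-Book | Validation.py | address_check
-- ===== SOURCE A (Python) =====
-- from string import ascii_letters, digits
--
-- def address_check(address):
--     if len(address) < 5:
--         return False  # Address Must Have at least 5 Character Long
--     else:
--         valid_letters = ascii_letters + digits + '.' + ',' + '\n' + '-' + '_' + '(' + ')' + ' '  # Valid Character list
--         for letter in address:
--             if letter not in valid_letters:
--                 return False  # Any Character not in Valid List Means Invalid Address
--         return True  # All Character in Valid List means Valid Address
-- ===== SOURCE B (Python) =====
-- import re
--
-- # Character class of exactly the allowed characters: ASCII letters, digits,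
-- # '.', ',', newline, '-', '_', '(', ')', space.
-- _ADDRESS_RE = re.compile(r'[A-Za-z0-9.,\n_() -]*')
--
--
-- def address_check(address):
--     if len(address) < 5:
--         return False
--     return _ADDRESS_RE.fullmatch(address) is not None
-- ===== Notes on version B (the rewrite author's own statement) =====
-- stated objective: idiomatic
-- what changed: Replaces the per-character early-returning loop with its 'letter in valid_letters' substring scan by a single precompiled regex character-class fullmatch over the whole address.
import Mathlib
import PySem

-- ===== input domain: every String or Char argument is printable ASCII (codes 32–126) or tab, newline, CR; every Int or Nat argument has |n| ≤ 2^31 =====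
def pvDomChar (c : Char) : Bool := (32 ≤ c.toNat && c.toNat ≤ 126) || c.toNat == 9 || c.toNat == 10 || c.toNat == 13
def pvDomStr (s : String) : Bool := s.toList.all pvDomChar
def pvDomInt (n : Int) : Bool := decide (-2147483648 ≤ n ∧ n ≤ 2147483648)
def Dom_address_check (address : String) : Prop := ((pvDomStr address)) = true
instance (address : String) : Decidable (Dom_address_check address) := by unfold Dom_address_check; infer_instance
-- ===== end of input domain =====

-- B replaces A's per-character early-returning loop over a concatenated valid-letters
-- string with a single regex character-class fullmatch (objective: idiomatic).

-- ===== PORT A =====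
-- valid_letters = ascii_letters + digits + '.' + ',' + '\n' + '-' + '_' + '(' + ')' + ' '
-- the concatenated string spelled out as its character list (String literals are
-- opaque to the kernel, so the list of characters is written directly; exact)
def validLetters : List Char :=
  ['a','b','c','d','e','f','g','h','i','j','k','l','m','n','o','p','q','r','s','t','u','v','w','x','y','z',
   'A','B','C','D','E','F','G','H','I','J','K','L','M','N','O','P','Q','R','S','T','U','V','W','X','Y','Z',
   '0','1','2','3','4','5','6','7','8','9','.',',','\n','-','_','(',')',' ']

-- 'letter not in valid_letters': letter is a single character, so Python's substring
-- test coincides with character membership in the valid_letters string (exact here).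
def addrLoop : List Char → Bool
  | [] => true
  | letter :: rest =>
    if !(validLetters.contains letter) then false else addrLoop rest

def address_check (address : String) : Bool :=
  if PySem.Str.len address < 5 then false
  else addrLoop address.toList

-- ===== PORT B =====
-- The regex r'[A-Za-z0-9.,\n_() -]*' ported by hand as its automaton: fullmatch of a
-- character-class star succeeds iff every character is in the class; the class is the
-- union of the three code-point ranges and the listed single characters (exact).
def regexClassChar (c : Char) : Bool :=
  (65 ≤ c.toNat && c.toNat ≤ 90) || (97 ≤ c.toNat && c.toNat ≤ 122) ||
  (48 ≤ c.toNat && c.toNat ≤ 57) || c.toNat == 46 || c.toNat == 44 ||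
  c.toNat == 10 || c.toNat == 95 || c.toNat == 40 || c.toNat == 41 ||
  c.toNat == 32 || c.toNat == 45

def address_check_alt (address : String) : Bool :=
  if PySem.Str.len address < 5 then false
  else address.toList.all regexClassChar

-- ===== PRECONDITION & SPEC =====
def Spec_address_check (address : String) (out : Bool) : Prop := out = address_check_alt address
instance (address : String) (out : Bool) : Decidable (Spec_address_check address out) := by unfold Spec_address_check; infer_instance

-- ===== CLAIM (what is proved, stated in full; the proofs are below) =====
def Claim_equal_address_check : Prop := ∀ (address : String), Dom_address_check address → Spec_address_check address (address_check address)

-- ===== LEMMAS AND PROOFS =====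

theorem char_class_eq_fin : ∀ i : Fin 128,
    validLetters.contains (Char.ofNat i.val) = regexClassChar (Char.ofNat i.val) := by
  decide

theorem char_class_eq (c : Char) (h : pvDomChar c = true) :
    validLetters.contains c = regexClassChar c := by
  have hlt : c.toNat < 128 := by
    simp only [pvDomChar, Bool.or_eq_true, Bool.and_eq_true, decide_eq_true_eq, beq_iff_eq] at h
    omega
  have key := char_class_eq_fin ⟨c.toNat, hlt⟩
  rwa [Char.ofNat_toNat] at key

theorem addrLoop_eq_all (l : List Char) (hd : ∀ c ∈ l, pvDomChar c = true) :
    addrLoop l = l.all regexClassChar := by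
  induction l with
  | nil => rfl
  | cons c rest ih =>
    have hc := char_class_eq c (hd c (List.mem_cons_self ..))
    have ih' := ih (fun x hx => hd x (List.mem_cons_of_mem _ hx))
    simp only [addrLoop, List.all_cons, hc, ih']
    cases regexClassChar c <;> simp

theorem address_check_spec : Claim_equal_address_check := by
  intro address hdom
  have hd : ∀ c ∈ address.toList, pvDomChar c = true := by
    simpa [Dom_address_check, pvDomStr, List.all_eq_true] using hdom
  unfold Spec_address_check address_check address_check_alt
  split
  · rfl
  · exact addrLoop_eq_all address.toList hd
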